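-- pv_equiv track=rewrite | github.com/Belugaluga2/Pokernow-Assistant | equity_categories.py | _has_straight_from_ranks
-- ===== SOURCE A (Python) =====
-- import itertools
--
-- def _has_straight_from_ranks(hole_ranks, board_ranks):
--     """Check if any 2 hole ranks + 3 board ranks form a straight. Rank-based (faster)."""
--     for h2 in itertools.combinations(range(len(hole_ranks)), 2):
--         for b3 in itertools.combinations(range(len(board_ranks)), 3):
--             ranks = sorted(set([hole_ranks[h2[0]], hole_ranks[h2[1]],
--                                 board_ranks[b3[0]], board_ranks[b3[1]], board_ranks[b3[2]]]))
--             if len(ranks) >= 5: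
--                 for i in range(len(ranks) - 4):
--                     if ranks[i + 4] - ranks[i] == 4:
--                         return True
--             # Ace-low
--             rank_set = set(ranks)
--             if {14, 2, 3, 4, 5}.issubset(rank_set):
--                 return True
--     return False
-- ===== SOURCE B (Python) =====
-- def _has_straight_from_ranks(hole_ranks, board_ranks):
--     """Check if any 2 hole ranks + 3 board ranks form a straight. Rank-based (faster)."""
--     hset = set(hole_ranks)
--     bset = set(board_ranks)
--     union = hset | bset
--     candidates = [[v, v + 1, v + 2, v + 3, v + 4] for v in union]
--     candidates.append([14, 2, 3, 4, 5])
--     for S in candidates: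
--         need_hole = [x for x in S if x not in bset]
--         if (all(x in hset for x in need_hole) and len(need_hole) <= 2
--                 and len([x for x in S if x in hset]) >= 2):
--             return True
--     return False
-- ===== Notes on version B (the rewrite author's own statement) =====
-- stated objective: faster
-- what changed: A tries every pair of hole indices against every triple of board indices and sorts each 5-card rank set; B instead precomputes the hole/board rank sets once and scans the fixed family of candidate straights (one 5-rank window per distinct rank seen, plus the wheel), checking that a window is covered with at most 2 ranks taken from the hole and at least 2 hole ranks present.
import Mathlib
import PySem

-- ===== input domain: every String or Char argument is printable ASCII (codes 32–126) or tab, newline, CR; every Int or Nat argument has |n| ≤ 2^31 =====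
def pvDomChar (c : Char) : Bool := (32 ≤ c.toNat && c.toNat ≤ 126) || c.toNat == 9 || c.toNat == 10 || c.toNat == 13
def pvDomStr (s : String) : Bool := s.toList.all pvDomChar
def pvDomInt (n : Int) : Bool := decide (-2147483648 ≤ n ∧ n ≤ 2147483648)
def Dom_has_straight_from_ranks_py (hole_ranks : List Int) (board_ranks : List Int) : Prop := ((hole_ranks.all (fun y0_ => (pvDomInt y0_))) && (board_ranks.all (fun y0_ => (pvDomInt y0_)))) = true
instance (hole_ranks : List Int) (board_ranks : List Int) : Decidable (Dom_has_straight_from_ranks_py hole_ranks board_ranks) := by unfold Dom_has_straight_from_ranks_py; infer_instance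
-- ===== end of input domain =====

-- B replaces A's scan over all 2-of-hole/3-of-board index combinations by a scan over the
-- candidate straights themselves (one 5-rank window per distinct rank, plus the wheel),
-- checking that each window can be covered by 2 distinct hole ranks and 3 distinct board ranks.

-- ===== PORT A =====
-- itertools.combinations(range(n), 2): ascending index pairs, in iteration order
def pvComb2 (n : Nat) : List (Nat × Nat) :=
  (List.range n).flatMap fun i =>
    (List.range n).filterMap fun j => if i < j then some (i, j) else none

-- itertools.combinations(range(n), 3): ascending index triples
def pvComb3 (n : Nat) : List (Nat × Nat × Nat) :=
  (List.range n).flatMap fun i => (List.range n).flatMap fun j =>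
    (List.range n).filterMap fun k => if i < j ∧ j < k then some (i, j, k) else none

-- the body of the combo loop, applied to ranks = sorted(set(vals))
def pvCheckAux (ranks : List Int) : Bool :=
  (decide (5 ≤ ranks.length) &&
    (List.range (ranks.length - 4)).any fun i => ranks.getD (i + 4) 0 - ranks.getD i 0 == 4)
  || [(14 : Int), 2, 3, 4, 5].all fun x => PySem.Set.contains (PySem.Set.ofList ranks) x

def pvCheckCombo (vals : List Int) : Bool :=
  pvCheckAux (PySem.List.sorted (PySem.Set.ofList vals) (fun x => x) false)

-- indices produced by pvComb2/pvComb3 are in range, so getD equals Python's xs[i] exactly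
def has_straight_from_ranks_py (hole_ranks : List Int) (board_ranks : List Int) : Bool :=
  (pvComb2 hole_ranks.length).any fun h2 =>
    (pvComb3 board_ranks.length).any fun b3 =>
      pvCheckCombo [hole_ranks.getD h2.1 0, hole_ranks.getD h2.2 0,
                    board_ranks.getD b3.1 0, board_ranks.getD b3.2.1 0, board_ranks.getD b3.2.2 0]

-- ===== PORT B =====
def pvWindow (v : Int) : List Int := [v, v + 1, v + 2, v + 3, v + 4]

def pvCondS (S : List Int) (hset bset : PySem.Set Int) : Bool :=
  let needHole := S.filter fun x => !(PySem.Set.contains bset x)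
  (needHole.all fun x => PySem.Set.contains hset x) && decide (needHole.length ≤ 2)
    && decide (2 ≤ (S.filter fun x => PySem.Set.contains hset x).length)

def has_straight_from_ranks_py_alt (hole_ranks : List Int) (board_ranks : List Int) : Bool :=
  let hset := PySem.Set.ofList hole_ranks
  let bset := PySem.Set.ofList board_ranks
  let union := PySem.Set.union hset board_ranks
  let candidates := union.map pvWindow ++ [[(14 : Int), 2, 3, 4, 5]]
  candidates.any fun S => pvCondS S hset bset

-- ===== PRECONDITION & SPEC =====
def Spec_has_straight_from_ranks_py (hole_ranks : List Int) (board_ranks : List Int) (out : Bool) : Prop := out = has_straight_from_ranks_py_alt hole_ranks board_ranks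
instance (hole_ranks : List Int) (board_ranks : List Int) (out : Bool) : Decidable (Spec_has_straight_from_ranks_py hole_ranks board_ranks out) := by unfold Spec_has_straight_from_ranks_py; infer_instance

-- ===== CLAIM (what is proved, stated in full; the proofs are below) =====
def Claim_equal_has_straight_from_ranks_py : Prop := ∀ (hole_ranks : List Int) (board_ranks : List Int), Dom_has_straight_from_ranks_py hole_ranks board_ranks → Spec_has_straight_from_ranks_py hole_ranks board_ranks (has_straight_from_ranks_py hole_ranks board_ranks)

-- ===== LEMMAS AND PROOFS =====

-- "xs and ys have the same elements"
def PvSameSet (xs ys : List Int) : Prop := ∀ x, x ∈ xs ↔ x ∈ ys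

-- "the elements of vals are exactly some 5-rank straight window or the wheel"
def PvGoodSet (vals : List Int) : Prop :=
  (∃ v, PvSameSet vals (pvWindow v)) ∨ PvSameSet vals [14, 2, 3, 4, 5]

-- "S can be covered by 2 distinct hole ranks plus board ranks"
def PvSplit (S hole board : List Int) : Prop :=
  ∃ a b, a ∈ hole ∧ b ∈ hole ∧ a ≠ b ∧ a ∈ S ∧ b ∈ S ∧ ∀ x ∈ S, x ≠ a → x ≠ b → x ∈ board

-- the intermediate form both programs are reduced to
def PvMid (hole board : List Int) : Prop :=
  ∃ a b c d e, a ∈ hole ∧ b ∈ hole ∧ c ∈ board ∧ d ∈ board ∧ e ∈ board ∧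
    ([a, b, c, d, e] : List Int).Nodup ∧ PvGoodSet [a, b, c, d, e]

theorem pv_mem_comb2 (n i j : Nat) : (i, j) ∈ pvComb2 n ↔ i < j ∧ j < n := by
  simp only [pvComb2, List.mem_flatMap, List.mem_filterMap, List.mem_range]
  constructor
  · rintro ⟨a, ha, b, hb, h⟩
    split at h
    · simp only [Option.some.injEq, Prod.mk.injEq] at h
      omega
    · simp at h
  · rintro ⟨hij, hjn⟩
    exact ⟨i, by omega, j, hjn, by simp [hij]⟩

theorem pv_mem_comb3 (n i j k : Nat) : (i, j, k) ∈ pvComb3 n ↔ i < j ∧ j < k ∧ k < n := by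
  simp only [pvComb3, List.mem_flatMap, List.mem_filterMap, List.mem_range]
  constructor
  · rintro ⟨a, ha, b, hb, c, hc, h⟩
    split at h
    · simp only [Option.some.injEq, Prod.mk.injEq] at h
      omega
    · simp at h
  · rintro ⟨hij, hjk, hkn⟩
    exact ⟨i, by omega, j, by omega, k, hkn, by simp [hij, hjk]⟩

theorem pv_good_of_sameset {xs ys : List Int} (h : PvSameSet xs ys) (hg : PvGoodSet ys) :
    PvGoodSet xs := by
  rcases hg with ⟨v, hv⟩ | hv
  · exact Or.inl ⟨v, fun x => (h x).trans (hv x)⟩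
  · exact Or.inr fun x => (h x).trans (hv x)

theorem pv_check_iff (vals : List Int) (h5 : vals.length = 5) :
    pvCheckCombo vals = true ↔ vals.Nodup ∧ PvGoodSet vals := by
  have hperm : (PySem.List.sorted (PySem.Set.ofList vals) (fun x => x) false).Perm
      (PySem.Set.ofList vals) := PySem.List.sorted_perm _ _ _
  have hpw := PySem.List.sorted_ofList_pairwise_lt (κ := Int) vals
  set R := PySem.List.sorted (PySem.Set.ofList vals) (fun x => x) false with hRdef
  have hmem : ∀ x, x ∈ R ↔ x ∈ vals := fun x => by
    rw [hRdef, PySem.List.mem_sorted, PySem.Set.mem_ofList]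
  have hndR : R.Nodup := hpw.imp fun h => ne_of_lt h
  have hlenR : R.length ≤ 5 := by
    have h1 := PySem.Set.length_ofList_le vals
    have h2 := hperm.length_eq
    omega
  have hnodup_of_len : R.length = 5 → vals.Nodup := by
    intro hl
    have hleq := hperm.length_eq
    have hsub : (PySem.Set.ofList vals) ⊆ vals := fun x hx => (PySem.Set.mem_ofList vals x).mp hx
    have hsp : (PySem.Set.ofList vals).Subperm vals :=
      List.subperm_of_subset (PySem.Set.nodup_ofList vals) hsub
    have hp : (PySem.Set.ofList vals).Perm vals := hsp.perm_of_length_le (by omega)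
    exact hp.nodup (PySem.Set.nodup_ofList vals)
  constructor
  · intro h
    rw [pvCheckCombo] at h
    rw [← hRdef] at h
    simp only [pvCheckAux, Bool.or_eq_true, Bool.and_eq_true, decide_eq_true_eq,
      List.any_eq_true, List.all_eq_true, List.mem_range] at h
    rcases h with ⟨hge, i, hi, hEq⟩ | hwheel
    · -- straight window branch
      have hl5 : R.length = 5 := by omega
      have hi0 : i = 0 := by omega
      subst hi0
      have hcl := hnodup_of_len hl5
      refine ⟨hcl, ?_⟩
      rw [List.pairwise_iff_getElem] at hpw
      have hg4 : R.getD 4 0 = R[4]'(by omega) := List.getD_eq_getElem R 0 (by omega)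
      have hg0 : R.getD 0 0 = R[0]'(by omega) := List.getD_eq_getElem R 0 (by omega)
      rw [beq_iff_eq, hg4, hg0] at hEq
      have hchain : ∀ p q (hp : p < R.length) (hq : q < R.length), p < q → R[p] < R[q] :=
        fun p q hp hq hpq => hpw p q hp hq hpq
      have hval : ∀ p (hp : p < R.length), R[p] = R[0]'(by omega) + p := by
        intro p hp
        have c01 := hchain 0 1 (by omega) (by omega) (by omega)
        have c12 := hchain 1 2 (by omega) (by omega) (by omega)
        have c23 := hchain 2 3 (by omega) (by omega) (by omega)
        have c34 := hchain 3 4 (by omega) (by omega) (by omega)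
        have hp5 : p < 5 := by omega
        interval_cases p <;> omega
      left
      refine ⟨R[0]'(by omega), fun x => ?_⟩
      rw [← hmem x, List.mem_iff_getElem]
      constructor
      · rintro ⟨p, hp, rfl⟩
        rw [hval p hp]
        have : p < 5 := by omega
        interval_cases p <;> simp [pvWindow]
      · intro hx
        simp only [pvWindow, List.mem_cons, List.not_mem_nil, or_false] at hx
        rcases hx with h | h | h | h | h
        · exact ⟨0, by omega, by rw [hval 0 (by omega)]; omega⟩
        · exact ⟨1, by omega, by rw [hval 1 (by omega)]; omega⟩
        · exact ⟨2, by omega, by rw [hval 2 (by omega)]; omega⟩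
        · exact ⟨3, by omega, by rw [hval 3 (by omega)]; omega⟩
        · exact ⟨4, by omega, by rw [hval 4 (by omega)]; omega⟩
    · -- wheel branch
      have hW : ∀ x ∈ ([14, 2, 3, 4, 5] : List Int), x ∈ R := by
        intro x hx
        have := hwheel x hx
        rw [PySem.Set.contains_iff, PySem.Set.mem_ofList] at this
        exact this
      have hndW : ([14, 2, 3, 4, 5] : List Int).Nodup := by decide
      have hsp : ([14, 2, 3, 4, 5] : List Int).Subperm R := List.subperm_of_subset hndW hW
      have hlen5 : R.length = 5 := by
        have h5le : (5 : Nat) ≤ R.length := by simpa using hsp.length_le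
        omega
      have hp : ([14, 2, 3, 4, 5] : List Int).Perm R := hsp.perm_of_length_le (by simp [hlen5])
      refine ⟨hnodup_of_len hlen5, Or.inr fun x => ?_⟩
      rw [← hmem x]
      exact ⟨fun h => hp.mem_iff.mpr h, fun h => hp.mem_iff.mp h⟩
  · rintro ⟨hnd, hgood⟩
    have hofl : PySem.Set.ofList vals = vals := PySem.Set.ofList_eq_self_of_nodup vals hnd
    rcases hgood with ⟨v, hss⟩ | hss
    · have hpermW : (pvWindow v).Perm (PySem.Set.ofList vals) := by
        rw [hofl, List.perm_ext_iff_of_nodup (by simp [pvWindow]) hnd]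
        exact fun x => (hss x).symm
      have hR : R = pvWindow v := by
        rw [hRdef]
        exact PySem.List.sorted_eq_of_perm_of_pairwise_lt _ _ _ hpermW (by simp [pvWindow])
      rw [pvCheckCombo, ← hRdef, hR]
      simp [pvCheckAux, pvWindow, List.range_succ]
    · have hwheel : ∀ x ∈ ([14, 2, 3, 4, 5] : List Int), x ∈ R := by
        intro x hx
        rw [hmem x]
        exact (hss x).mpr hx
      rw [pvCheckCombo, ← hRdef]
      simp only [pvCheckAux, Bool.or_eq_true, List.all_eq_true]
      right
      intro x hx
      rw [PySem.Set.contains_iff, PySem.Set.mem_ofList]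
      exact hwheel x hx
theorem pv_exists_pair {l : List Int} (h2 : 2 ≤ l.length) (hnd : l.Nodup) :
    ∃ p q, p ≠ q ∧ p ∈ l ∧ q ∈ l := by
  rcases l with _ | ⟨p, _ | ⟨q, t⟩⟩
  · simp at h2
  · simp at h2
  · refine ⟨p, q, ?_, by simp, by simp⟩
    simp only [List.nodup_cons, List.mem_cons] at hnd
    exact fun h => hnd.1 (Or.inl h)

theorem pv_two_le_of_pair {l : List Int} {a b : Int} (ha : a ∈ l) (hb : b ∈ l) (hab : a ≠ b) :
    2 ≤ l.length := by
  have hsp : ([a, b] : List Int).Subperm l :=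
    List.subperm_of_subset (by simp [hab]) (by
      intro x hx
      simp only [List.mem_cons, List.not_mem_nil, or_false] at hx
      rcases hx with rfl | rfl <;> assumption)
  simpa using hsp.length_le

theorem pv_condS_iff (S hole board : List Int) (hnd : S.Nodup) :
    pvCondS S (PySem.Set.ofList hole) (PySem.Set.ofList board) = true ↔ PvSplit S hole board := by
  simp only [pvCondS]
  set nh := S.filter (fun x => !(PySem.Set.contains (PySem.Set.ofList board) x)) with hnh
  set sf := S.filter (fun x => PySem.Set.contains (PySem.Set.ofList hole) x) with hsf
  have hmemnh : ∀ x, x ∈ nh ↔ x ∈ S ∧ x ∉ board := by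
    intro x
    rw [hnh, List.mem_filter]
    simp [PySem.Set.mem_ofList]
  have hmemsf : ∀ x, x ∈ sf ↔ x ∈ S ∧ x ∈ hole := by
    intro x
    rw [hsf, List.mem_filter]
    simp [PySem.Set.mem_ofList]
  have hndnh : nh.Nodup := hnd.filter _
  have hndsf : sf.Nodup := hnd.filter _
  rw [Bool.and_eq_true, Bool.and_eq_true]
  constructor
  · rintro ⟨⟨hall, hlen2⟩, hsf2⟩
    rw [List.all_eq_true] at hall
    rw [decide_eq_true_eq] at hlen2 hsf2
    have hallm : ∀ x ∈ nh, x ∈ hole := by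
      intro x hx
      have := hall x hx
      rwa [PySem.Set.contains_iff, PySem.Set.mem_ofList] at this
    obtain ⟨p, q, hpq, hp, hq⟩ := pv_exists_pair hsf2 hndsf
    have hpS := (hmemsf p).mp hp
    have hqS := (hmemsf q).mp hq
    -- find a,b distinct in S∩hole covering nh
    have hcover : ∃ a b, a ≠ b ∧ (a ∈ S ∧ a ∈ hole) ∧ (b ∈ S ∧ b ∈ hole) ∧ ∀ x ∈ nh, x = a ∨ x = b := by
      interval_cases h : nh.length
      · have hnil : nh = [] := List.length_eq_zero_iff.mp h
        exact ⟨p, q, hpq, hpS, hqS, by intro x hx; rw [hnil] at hx; simp at hx⟩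
      · obtain ⟨u, hu⟩ := List.length_eq_one_iff.mp h
        have humem : u ∈ nh := by rw [hu]; simp
        have huS := (hmemnh u).mp humem
        have huh := hallm u humem
        have hcovu : ∀ x ∈ nh, x = u := by
          intro x hx
          rw [hu] at hx
          simpa using hx
        by_cases hup : u = p
        · refine ⟨u, q, ?_, ⟨huS.1, huh⟩, ⟨hqS.1, hqS.2⟩, ?_⟩
          · rw [hup]; exact hpq
          · intro x hx
            exact Or.inl (hcovu x hx)
        · refine ⟨u, p, hup, ⟨huS.1, huh⟩, ⟨hpS.1, hpS.2⟩, ?_⟩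
          intro x hx
          exact Or.inl (hcovu x hx)
      · obtain ⟨u, w, huw⟩ := List.length_eq_two.mp h
        have humem : u ∈ nh := by rw [huw]; simp
        have hwmem : w ∈ nh := by rw [huw]; simp
        have huwne : u ≠ w := by
          have hx := hndnh
          rw [huw] at hx
          simp only [List.nodup_cons, List.mem_singleton] at hx
          exact hx.1
        refine ⟨u, w, huwne, ⟨((hmemnh u).mp humem).1, hallm u humem⟩,
          ⟨((hmemnh w).mp hwmem).1, hallm w hwmem⟩, ?_⟩
        intro x hx
        rw [huw] at hx
        simpa using hx
    obtain ⟨a, b, hab, ⟨haS, hah⟩, ⟨hbS, hbh⟩, hcov⟩ := hcover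
    refine ⟨a, b, hah, hbh, hab, haS, hbS, fun x hxS hxa hxb => ?_⟩
    by_contra hxB
    rcases hcov x ((hmemnh x).mpr ⟨hxS, hxB⟩) with rfl | rfl
    · exact hxa rfl
    · exact hxb rfl
  · rintro ⟨a, b, hah, hbh, hab, haS, hbS, hrest⟩
    have hnhsub : ∀ x ∈ nh, x = a ∨ x = b := by
      intro x hx
      rw [hmemnh] at hx
      by_contra hcon
      push Not at hcon
      exact hx.2 (hrest x hx.1 hcon.1 hcon.2)
    refine ⟨⟨?_, ?_⟩, ?_⟩
    · rw [List.all_eq_true]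
      intro x hx
      rw [PySem.Set.contains_iff, PySem.Set.mem_ofList]
      rcases hnhsub x hx with rfl | rfl <;> assumption
    · rw [decide_eq_true_eq]
      have hsp : nh.Subperm [a, b] := List.subperm_of_subset hndnh (by
        intro x hx
        rcases hnhsub x hx with rfl | rfl <;> simp)
      simpa using hsp.length_le
    · rw [decide_eq_true_eq]
      exact pv_two_le_of_pair ((hmemsf a).mpr ⟨haS, hah⟩) ((hmemsf b).mpr ⟨hbS, hbh⟩) hab
theorem pv_pick2 {l : List Int} {a b : Int} (ha : a ∈ l) (hb : b ∈ l) (hab : a ≠ b) :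
    ∃ i j, i < j ∧ j < l.length ∧ ([l.getD i 0, l.getD j 0] : List Int).Perm [a, b] := by
  obtain ⟨ia, hia, hva⟩ := List.mem_iff_getElem.mp ha
  obtain ⟨ib, hib, hvb⟩ := List.mem_iff_getElem.mp hb
  have hne : ia ≠ ib := fun h => hab (by subst h; rw [← hva, ← hvb])
  rcases Nat.lt_or_gt_of_ne hne with h | h
  · exact ⟨ia, ib, h, hib, by
      rw [List.getD_eq_getElem l 0 hia, List.getD_eq_getElem l 0 hib, hva, hvb]⟩
  · exact ⟨ib, ia, h, hia, by
      rw [List.getD_eq_getElem l 0 hib, List.getD_eq_getElem l 0 hia, hva, hvb]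
      exact List.Perm.swap a b []⟩
theorem pv_pick3 {l : List Int} {c d e : Int} (hc : c ∈ l) (hd : d ∈ l) (he : e ∈ l)
    (hcd : c ≠ d) (hce : c ≠ e) (hde : d ≠ e) :
    ∃ i j k, i < j ∧ j < k ∧ k < l.length ∧
      ([l.getD i 0, l.getD j 0, l.getD k 0] : List Int).Perm [c, d, e] := by
  obtain ⟨p, hp, hvc⟩ := List.mem_iff_getElem.mp hc
  obtain ⟨q, hq, hvd⟩ := List.mem_iff_getElem.mp hd
  obtain ⟨r, hr, hve⟩ := List.mem_iff_getElem.mp he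
  have hpq : p ≠ q := fun h => hcd (by subst h; rw [← hvc, ← hvd])
  have hpr : p ≠ r := fun h => hce (by subst h; rw [← hvc, ← hve])
  have hqr : q ≠ r := fun h => hde (by subst h; rw [← hvd, ← hve])
  have P2 : ([c, e, d] : List Int).Perm [c, d, e] := .cons c (.swap d e [])
  have P3 : ([d, c, e] : List Int).Perm [c, d, e] := .swap c d [e]
  have P5 : ([d, e, c] : List Int).Perm [c, d, e] := ((List.Perm.cons d (.swap c e [])).trans P3)
  have P6 : ([e, c, d] : List Int).Perm [c, d, e] := ((List.Perm.swap c e [d]).trans P2)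
  have P4 : ([e, d, c] : List Int).Perm [c, d, e] := ((List.Perm.swap d e [c]).trans P5)
  rcases Nat.lt_trichotomy p q with h1 | h1 | h1
  · rcases Nat.lt_trichotomy q r with h2 | h2 | h2
    · exact ⟨p, q, r, h1, h2, hr, by
        rw [List.getD_eq_getElem l 0 hp, List.getD_eq_getElem l 0 hq,
          List.getD_eq_getElem l 0 hr, hvc, hvd, hve]⟩
    · exact absurd h2 hqr
    · rcases Nat.lt_trichotomy p r with h3 | h3 | h3
      · exact ⟨p, r, q, h3, h2, hq, by
          rw [List.getD_eq_getElem l 0 hp, List.getD_eq_getElem l 0 hr,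
            List.getD_eq_getElem l 0 hq, hvc, hve, hvd]
          exact P2⟩
      · exact absurd h3 hpr
      · exact ⟨r, p, q, h3, h1, hq, by
          rw [List.getD_eq_getElem l 0 hr, List.getD_eq_getElem l 0 hp,
            List.getD_eq_getElem l 0 hq, hve, hvc, hvd]
          exact P6⟩
  · exact absurd h1 hpq
  · rcases Nat.lt_trichotomy p r with h2 | h2 | h2
    · exact ⟨q, p, r, h1, h2, hr, by
        rw [List.getD_eq_getElem l 0 hq, List.getD_eq_getElem l 0 hp,
          List.getD_eq_getElem l 0 hr, hvd, hvc, hve]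
        exact P3⟩
    · exact absurd h2 hpr
    · rcases Nat.lt_trichotomy q r with h3 | h3 | h3
      · exact ⟨q, r, p, h3, h2, hp, by
          rw [List.getD_eq_getElem l 0 hq, List.getD_eq_getElem l 0 hr,
            List.getD_eq_getElem l 0 hp, hvd, hve, hvc]
          exact P5⟩
      · exact absurd h3 hqr
      · exact ⟨r, q, p, h3, h1, hp, by
          rw [List.getD_eq_getElem l 0 hr, List.getD_eq_getElem l 0 hq,
            List.getD_eq_getElem l 0 hp, hve, hvd, hvc]
          exact P4⟩
theorem pv_A_iff (hole board : List Int) :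
    has_straight_from_ranks_py hole board = true ↔ PvMid hole board := by
  rw [has_straight_from_ranks_py]
  simp only [List.any_eq_true]
  constructor
  · rintro ⟨⟨i, j⟩, h2mem, ⟨k, l, m⟩, h3mem, hchk⟩
    rw [pv_mem_comb2] at h2mem
    rw [pv_mem_comb3] at h3mem
    dsimp only at hchk
    have h1 := (pv_check_iff _ rfl).mp hchk
    refine ⟨_, _, _, _, _, ?_, ?_, ?_, ?_, ?_, h1.1, h1.2⟩ <;>
      (rw [List.getD_eq_getElem _ 0 (by omega)]; exact List.getElem_mem _)
  · rintro ⟨a, b, c, d, e, hah, hbh, hcb, hdb, heb, hnd, hgood⟩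
    have hab : a ≠ b := by intro h; subst h; simp at hnd
    have hcd : c ≠ d := by intro h; subst h; simp at hnd
    have hce : c ≠ e := by intro h; subst h; simp at hnd
    have hde : d ≠ e := by intro h; subst h; simp at hnd
    obtain ⟨i, j, hij, hj, hp2⟩ := pv_pick2 hah hbh hab
    obtain ⟨k, l, m, hkl, hlm, hm, hp3⟩ := pv_pick3 hcb hdb heb hcd hce hde
    refine ⟨(i, j), (pv_mem_comb2 _ _ _).mpr ⟨hij, hj⟩,
      (k, l, m), (pv_mem_comb3 _ _ _ _).mpr ⟨hkl, hlm, hm⟩, ?_⟩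
    have hp5 : ([hole.getD i 0, hole.getD j 0, board.getD k 0, board.getD l 0,
        board.getD m 0] : List Int).Perm [a, b, c, d, e] := hp2.append hp3
    exact (pv_check_iff _ rfl).mpr
      ⟨hp5.symm.nodup hnd, pv_good_of_sameset (fun x => hp5.mem_iff) hgood⟩

theorem pv_mid_of_split {S hole board : List Int} (hndS : S.Nodup) (hlen : S.length = 5)
    (hgood : PvGoodSet S) (hsp : PvSplit S hole board) : PvMid hole board := by
  obtain ⟨a, b, hah, hbh, hab, haS, hbS, hrest⟩ := hsp
  have hpermF := List.filter_append_perm (fun x => x == a || x == b) S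
  have hfilp : (S.filter fun x => x == a || x == b).Perm [a, b] := by
    rw [List.perm_ext_iff_of_nodup (hndS.filter _) (by simp [hab])]
    intro x
    simp only [List.mem_filter, beq_iff_eq, Bool.or_eq_true, List.mem_cons, List.not_mem_nil, or_false]
    constructor
    · rintro ⟨_, h⟩; exact h
    · rintro (rfl | rfl)
      · exact ⟨haS, Or.inl rfl⟩
      · exact ⟨hbS, Or.inr rfl⟩
  have hperm2 : (([a, b] : List Int) ++ S.filter fun x => !(x == a || x == b)).Perm S :=
    (hfilp.symm.append (List.Perm.refl _)).trans hpermF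
  have hlen3 : (S.filter fun x => !(x == a || x == b)).length = 3 := by
    have := hperm2.length_eq
    simp only [List.length_append, List.length_cons, List.length_nil] at this
    omega
  obtain ⟨c, d, e, hcde⟩ := List.length_eq_three.mp hlen3
  have hmemrest : ∀ x ∈ ([c, d, e] : List Int), x ∈ board := by
    intro x hx
    rw [← hcde] at hx
    simp only [List.mem_filter, Bool.not_eq_eq_eq_not, Bool.not_true, Bool.or_eq_false_iff,
      beq_eq_false_iff_ne] at hx
    exact hrest x hx.1 hx.2.1 hx.2.2
  have hndrest : ([c, d, e] : List Int).Nodup := hcde ▸ hndS.filter _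
  have hperm5 : (([a, b, c, d, e] : List Int)).Perm S := by
    have := hperm2
    rw [hcde] at this
    exact this
  refine ⟨a, b, c, d, e, hah, hbh, hmemrest c (by simp), hmemrest d (by simp),
    hmemrest e (by simp), hperm5.symm.nodup hndS, ?_⟩
  exact pv_good_of_sameset (fun x => hperm5.mem_iff) hgood

theorem pv_B_iff (hole board : List Int) :
    has_straight_from_ranks_py_alt hole board = true ↔ PvMid hole board := by
  rw [has_straight_from_ranks_py_alt]
  simp only [List.any_append, List.any_map, Bool.or_eq_true, List.any_eq_true,
    List.any_cons, List.any_nil, Bool.or_false, Function.comp]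
  have hwheelnd : ([14, 2, 3, 4, 5] : List Int).Nodup := by decide
  constructor
  · rintro (⟨v, hv, hcond⟩ | hcond)
    · have hsp := (pv_condS_iff (pvWindow v) hole board (by simp [pvWindow])).mp hcond
      exact pv_mid_of_split (by simp [pvWindow]) (by simp [pvWindow])
        (Or.inl ⟨v, fun x => Iff.rfl⟩) hsp
    · have hsp := (pv_condS_iff _ hole board hwheelnd).mp hcond
      exact pv_mid_of_split hwheelnd (by decide) (Or.inr fun x => Iff.rfl) hsp
  · rintro ⟨a, b, c, d, e, hah, hbh, hcb, hdb, heb, hnd, hgood⟩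
    have hab : a ≠ b := by intro h; subst h; simp at hnd
    have hsplit : ∀ S : List Int, PvSameSet [a, b, c, d, e] S → PvSplit S hole board := by
      intro S hss
      refine ⟨a, b, hah, hbh, hab, (hss a).mp (by simp), (hss b).mp (by simp),
        fun x hxS hxa hxb => ?_⟩
      have hx5 := (hss x).mpr hxS
      simp only [List.mem_cons, List.not_mem_nil, or_false] at hx5
      rcases hx5 with rfl | rfl | rfl | rfl | rfl
      · exact absurd rfl hxa
      · exact absurd rfl hxb
      · exact hcb
      · exact hdb
      · exact heb
    rcases hgood with ⟨v, hss⟩ | hss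
    · left
      refine ⟨v, ?_, (pv_condS_iff (pvWindow v) hole board (by simp [pvWindow])).mpr
        (hsplit _ hss)⟩
      have hv5 : v ∈ ([a, b, c, d, e] : List Int) := (hss v).mpr (by simp [pvWindow])
      rw [PySem.Set.mem_union, PySem.Set.mem_ofList]
      simp only [List.mem_cons, List.not_mem_nil, or_false] at hv5
      rcases hv5 with rfl | rfl | rfl | rfl | rfl
      · exact Or.inl hah
      · exact Or.inl hbh
      · exact Or.inr hcb
      · exact Or.inr hdb
      · exact Or.inr heb
    · exact Or.inr ((pv_condS_iff _ hole board hwheelnd).mpr (hsplit _ hss))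

-- ===== VERDICT (by name: the statement is the Claim_ definition above) =====
theorem has_straight_from_ranks_py_spec : Claim_equal_has_straight_from_ranks_py := by
  intro hole board _
  unfold Spec_has_straight_from_ranks_py
  rw [Bool.eq_iff_iff, pv_A_iff, pv_B_iff]
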